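-- pv_equiv track=rewrite | github.com/juggler14/financial_university_python_1_hw | university_1_22.py | find_words_with_digits
-- ===== SOURCE A (Python) =====
-- def find_words_with_digits(text):
--     words = text.split()
--     result = []
--
--     for word in words:
--         clean_word = word.strip('.,:;!?()[]{}"\'')
--         digit_count = 0
--         for char in clean_word:
--             if char.isdigit():
--                 digit_count += 1
--                 if digit_count >= 2:
--                     result.append(clean_word)
--                     break
--             else:
--                 digit_count = 0
--
--     return result
-- ===== SOURCE B (Python) =====
-- def find_words_with_digits(text):
--     cleaned = (word.strip('.,:;!?()[]{}"\'') for word in text.split())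
--     return [w for w in cleaned
--             if any(a.isdigit() and b.isdigit() for a, b in zip(w, w[1:]))]
-- ===== Notes on version B (the rewrite author's own statement) =====
-- stated objective: simpler
-- what changed: Replaced the reset-on-nondigit counter state machine (with break) inside an accumulator loop by a stateless pairwise test: map strip over the words, then filter by any(a.isdigit() and b.isdigit() for adjacent pairs).
import Mathlib
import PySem

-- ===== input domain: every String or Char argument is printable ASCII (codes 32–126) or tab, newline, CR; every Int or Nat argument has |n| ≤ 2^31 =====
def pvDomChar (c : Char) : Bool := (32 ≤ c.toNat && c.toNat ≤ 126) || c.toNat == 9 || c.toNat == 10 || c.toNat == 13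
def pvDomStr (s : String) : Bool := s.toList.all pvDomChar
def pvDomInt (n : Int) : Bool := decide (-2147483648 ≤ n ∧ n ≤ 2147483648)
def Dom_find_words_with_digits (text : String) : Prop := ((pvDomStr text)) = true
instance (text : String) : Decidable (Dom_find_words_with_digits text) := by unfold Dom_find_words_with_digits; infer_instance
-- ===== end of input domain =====

-- B replaces A's reset-on-nondigit counter loop (with break) by a stateless
-- map-then-filter using a pairwise adjacent-digit test; same output, simpler.

-- ===== PORT A =====
-- A's inner for-loop over clean_word: digit counter, reset on non-digit,
-- 'break' (= return true) as soon as the counter reaches 2.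
def pvAInner : List Char → Int → Bool
  | [], _ => false
  | c :: rest, cnt =>
    if PySem.Chars.isdigit c then
      if cnt + 1 ≥ 2 then true else pvAInner rest (cnt + 1)
    else pvAInner rest 0

def find_words_with_digits (text : String) : List String :=
  (PySem.Str.split₀ text).foldl
    (fun result word =>
      let clean_word := PySem.Str.stripChars word ".,:;!?()[]{}\"'"
      if pvAInner clean_word.toList 0 then result ++ [clean_word] else result)
    []

-- ===== PORT B =====
-- any(a.isdigit() and b.isdigit() for a, b in zip(w, w[1:])); w[1:] on the
-- char list is exactly List.tail.
def pvHasAdjPair (w : String) : Bool :=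
  (w.toList.zip w.toList.tail).any
    (fun p => PySem.Chars.isdigit p.1 && PySem.Chars.isdigit p.2)

def find_words_with_digits_alt (text : String) : List String :=
  (((PySem.Str.split₀ text).map
      (fun word => PySem.Str.stripChars word ".,:;!?()[]{}\"'")).filter
    pvHasAdjPair)

-- ===== PRECONDITION & SPEC =====
def Spec_find_words_with_digits (text : String) (out : List String) : Prop := out = find_words_with_digits_alt text
instance (text : String) (out : List String) : Decidable (Spec_find_words_with_digits text out) := by unfold Spec_find_words_with_digits; infer_instance

-- ===== CLAIM (what is proved, stated in full; the proofs are below) =====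
def Claim_equal_find_words_with_digits : Prop := ∀ (text : String), Dom_find_words_with_digits text → Spec_find_words_with_digits text (find_words_with_digits text)

-- ===== LEMMAS AND PROOFS =====

-- The key characterisation: A's counter loop (started at 0, and at 1 with a
-- digit just seen) fires exactly when some adjacent pair of digits exists.
theorem pvAInner_eq (cs : List Char) :
    pvAInner cs 0 = (cs.zip cs.tail).any
        (fun p => PySem.Chars.isdigit p.1 && PySem.Chars.isdigit p.2) ∧
    pvAInner cs 1 = ((match cs with | [] => false | c :: _ => PySem.Chars.isdigit c)
        || (cs.zip cs.tail).any
            (fun p => PySem.Chars.isdigit p.1 && PySem.Chars.isdigit p.2)) := by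
  induction cs with
  | nil => simp [pvAInner]
  | cons c rest ih =>
    obtain ⟨ih0, ih1⟩ := ih
    constructor
    · by_cases h : PySem.Chars.isdigit c = true
      · rw [pvAInner]
        simp only [h, if_true, if_neg (by omega : ¬ (0:Int) + 1 ≥ 2), ih1]
        cases rest with
        | nil => simp [pvAInner]
        | cons d r => simpa [h] using ih1
      · rw [pvAInner]
        simp only [h, if_false, ih0]
        cases rest with
        | nil => simp
        | cons d r =>
          simp [List.any_cons, Bool.eq_false_iff.mpr h]
    · by_cases h : PySem.Chars.isdigit c = true
      · rw [pvAInner]; simp [h]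
      · rw [pvAInner]
        simp only [h, if_false, ih0]
        cases rest with
        | nil => simp [h]
        | cons d r => simp [List.any_cons, Bool.eq_false_iff.mpr h, h]

theorem pvAInner_eq_hasAdjPair (w : String) :
    pvAInner w.toList 0 = pvHasAdjPair w := (pvAInner_eq w.toList).1

-- ===== VERDICT (by name: the statement is the Claim_ definition above) =====
theorem find_words_with_digits_spec : Claim_equal_find_words_with_digits := by
  intro text _
  show _ = _
  unfold find_words_with_digits find_words_with_digits_alt
  simp only [pvAInner_eq_hasAdjPair]
  rw [PySem.List.foldl_append_if (f := fun word => PySem.Str.stripChars word ".,:;!?()[]{}\"'")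
        (p := fun word => pvHasAdjPair (PySem.Str.stripChars word ".,:;!?()[]{}\"'"))]
  simp [List.filter_map, Function.comp_def]
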